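-- pv_equiv track=rewrite | github.com/Brmanzo/esp-computer-vision | sim/unit_testing/classifier_layer/test_classifier_layer.py | unpack_biases
-- ===== SOURCE A (Python) =====
-- def unpack_biases(packed_val: int, BW: int, OC: int):
--     """Reconstructs the 4D weights matrix from the Verilog parameter integer."""
--     mask = (1 << BW) - 1
--     sign_bit = 1 << (BW - 1)
--
--     biases1 = []
--     bit_shift = 0
--
--     # Must mirror the exact same LSB -> MSB iteration order used in packing
--     for _ in range(OC):
--         # Extract the specific bits for this weight
--         w_bits = (packed_val >> bit_shift) & mask
--
--         # Convert from two's complement back to a signed Python integer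
--         if w_bits & sign_bit:
--             w = w_bits - (1 << BW)
--         else:
--             w = w_bits
--
--         biases1.append(w)
--         bit_shift += BW
--
--     return biases1
-- ===== SOURCE B (Python) =====
-- def unpack_biases(packed_val: int, BW: int, OC: int):
--     """Divide-and-conquer unpacking: recursively split the field count in halves,
--     shifting the packed value once per split; each field is cut out with shifts
--     alone, so no 2**BW-sized mask constant is ever built."""
--     def go(v, n):
--         if n <= 0:
--             return []
--         if n == 1:
--             r = v - ((v >> BW) << BW)      # == v & ((1 << BW) - 1)
--             return [r - (1 << BW) if r >> (BW - 1) else r]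
--         h = n // 2
--         return go(v, h) + go(v >> (h * BW), n - h)
--
--     return go(packed_val, OC)
-- ===== Notes on version B (the rewrite author's own statement) =====
-- stated objective: alternative
-- what changed: Replaces the linear LSB-to-MSB loop with an ever-growing shift by a divide-and-conquer split of the packed integer that halves the field count at each level, cutting fields out with shifts alone (no 2^BW-sized mask constant) and decoding the sign by a one-bit shift test instead of a bit mask.
import Mathlib
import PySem

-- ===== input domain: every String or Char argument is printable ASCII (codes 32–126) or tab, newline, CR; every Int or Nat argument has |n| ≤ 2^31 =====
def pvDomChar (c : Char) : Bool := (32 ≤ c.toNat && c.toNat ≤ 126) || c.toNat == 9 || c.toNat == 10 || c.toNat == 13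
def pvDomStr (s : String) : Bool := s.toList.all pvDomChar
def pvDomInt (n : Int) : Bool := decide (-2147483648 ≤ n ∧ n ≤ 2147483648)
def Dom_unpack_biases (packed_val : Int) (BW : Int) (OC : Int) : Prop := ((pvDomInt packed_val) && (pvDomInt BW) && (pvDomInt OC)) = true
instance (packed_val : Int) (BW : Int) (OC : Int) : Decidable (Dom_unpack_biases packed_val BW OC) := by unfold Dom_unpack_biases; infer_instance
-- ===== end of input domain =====

-- B unpacks the packed biases by divide-and-conquer splitting of the integer instead of a
-- linear loop with an ever-growing shift; return values agree for every BW >= 1 (A raises otherwise).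


-- ===== PORT A =====
-- Loop of A: state (list built so far = cons spine, bit_shift); one iteration per count.
-- Python bit ops are ported by exact arithmetic on the Pre_ domain (BW ≥ 1, so shifts are by Nats):
--   `(p >> s) & ((1 << BW) - 1)`  =  (p >>> s) % 2^BW   (floor shift + mask = floor mod, exact for all p)
--   `w_bits & sign_bit` truthiness, w_bits ≥ 0  =  bit BW-1 of w_bits  =  w_bits / 2^(BW-1) % 2 = 1 (exact)
def uaLoop (p full sign_bit : Int) (k : Nat) : Nat → Nat → List Int
  | 0, _ => []
  | c + 1, bit_shift =>
    let w_bits := (p >>> bit_shift) % full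
    let w := if w_bits / sign_bit % 2 = 1 then w_bits - full else w_bits
    w :: uaLoop p full sign_bit k c (bit_shift + k)

def unpack_biases (packed_val : Int) (BW : Int) (OC : Int) : List Int :=
  -- mask = (1 << BW) - 1 is folded into the `% full` above; sign_bit = 1 << (BW - 1); 1 << BW = full
  uaLoop packed_val (2 ^ BW.toNat) (2 ^ (BW - 1).toNat) BW.toNat OC.toNat 0

-- ===== PORT B =====
-- go of Source B: split the field count in halves, shifting the packed value once per split.
-- Bit ops ported by exact arithmetic on the Pre_ domain (BW ≥ 1, shifts by Nats):
--   `v - ((v >> BW) << BW)` stays a shift/shift/sub; `1 << BW` = 2^BW;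
--   `if r >> (BW - 1):` truthiness = the shifted value is nonzero.
def ubGo (k : Nat) (v : Int) (n : Nat) : List Int :=
  if n = 0 then []
  else if n = 1 then
    let r := v - ((v >>> k) <<< k)
    [if r >>> (k - 1) ≠ 0 then r - 2 ^ k else r]
  else
    let h := n / 2
    ubGo k v h ++ ubGo k (v >>> (h * k)) (n - h)
termination_by n
decreasing_by all_goals omega

def unpack_biases_alt (packed_val : Int) (BW : Int) (OC : Int) : List Int :=
  ubGo BW.toNat packed_val OC.toNat

-- ===== PRECONDITION & SPEC =====
-- Pre_: Python A raises ValueError ("negative shift count", from 1 << BW or 1 << (BW-1)) whenever BW ≤ 0.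
def Pre_unpack_biases (packed_val : Int) (BW : Int) (OC : Int) : Prop := 1 ≤ BW
instance (packed_val : Int) (BW : Int) (OC : Int) : Decidable (Pre_unpack_biases packed_val BW OC) := by unfold Pre_unpack_biases; infer_instance
def pvWitness_unpack_biases : Int × Int × Int := (5, 3, 2)

def Spec_unpack_biases (packed_val : Int) (BW : Int) (OC : Int) (out : List Int) : Prop := out = unpack_biases_alt packed_val BW OC
instance (packed_val : Int) (BW : Int) (OC : Int) (out : List Int) : Decidable (Spec_unpack_biases packed_val BW OC out) := by unfold Spec_unpack_biases; infer_instance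

-- ===== CLAIM (what is proved, stated in full; the proofs are below) =====
def Claim_equal_unpack_biases : Prop := ∀ (packed_val : Int) (BW : Int) (OC : Int), Dom_unpack_biases packed_val BW OC → Pre_unpack_biases packed_val BW OC → Spec_unpack_biases packed_val BW OC (unpack_biases packed_val BW OC)

-- ===== LEMMAS AND PROOFS =====

-- the common field decoder both loops compute, as a function of the field index
def pvField (p : Int) (k : Nat) (i : Nat) : Int := (p >>> (i * k)) % 2 ^ k

def pvDec (full half r : Int) : Int := if half ≤ r then r - full else r

theorem pvField_nonneg (p : Int) (k i : Nat) : 0 ≤ pvField p k i :=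
  Int.emod_nonneg _ (by positivity)

theorem pvField_lt (p : Int) (k i : Nat) : pvField p k i < 2 ^ k :=
  Int.emod_lt_of_pos _ (by positivity)

-- A's bit test agrees with B's comparison on values in [0, 2^k), k ≥ 1
theorem dec_eq (k : Nat) (hk : 1 ≤ k) (r : Int) (h0 : 0 ≤ r) (h1 : r < 2 ^ k) :
    (if r / 2 ^ (k - 1) % 2 = 1 then r - 2 ^ k else r) = pvDec (2 ^ k) (2 ^ (k - 1)) r := by
  unfold pvDec
  have hs : (0:Int) < 2 ^ (k - 1) := by positivity
  have hk2 : (2:Int) ^ k = 2 ^ (k - 1) * 2 := by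
    rw [← pow_succ]; congr 1; omega
  have hdm : 2 ^ (k - 1) * (r / 2 ^ (k - 1)) + r % 2 ^ (k - 1) = r :=
    Int.mul_ediv_add_emod r (2 ^ (k - 1))
  have hm0 := Int.emod_nonneg r (ne_of_gt hs)
  have hm1 := Int.emod_lt_of_pos r hs
  rw [hk2] at h1
  have hq0 : 0 ≤ r / 2 ^ (k - 1) := Int.ediv_nonneg h0 (le_of_lt hs)
  have hq2 : r / 2 ^ (k - 1) < 2 := by
    rw [Int.ediv_lt_iff_lt_mul hs]; omega
  have hq01 : r / 2 ^ (k - 1) = 0 ∨ r / 2 ^ (k - 1) = 1 := by omega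
  rcases hq01 with h | h <;> rw [h] at hdm ⊢ <;> rw [hk2] <;> simp at hdm ⊢ <;> omega

theorem uaLoop_eq (p : Int) (k : Nat) (hk : 1 ≤ k) (c s : Nat) :
    uaLoop p (2 ^ k) (2 ^ (k - 1)) k c (s * k) =
      (List.range c).map (fun i => pvDec (2 ^ k) (2 ^ (k - 1)) (pvField p k (s + i))) := by
  induction c generalizing s with
  | zero => simp [uaLoop]
  | succ c ih =>
    rw [List.range_succ_eq_map, List.map_cons, List.map_map]
    show uaLoop p (2 ^ k) (2 ^ (k - 1)) k (c + 1) (s * k) = _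
    rw [uaLoop]
    have hstep : s * k + k = (s + 1) * k := by ring
    rw [hstep, ih (s + 1)]
    have harg : (p >>> (s * k)) % 2 ^ k = pvField p k s := by
      simp [pvField, Nat.mul_comm]
    congr 1
    · rw [harg]
      exact dec_eq k hk _ (pvField_nonneg p k s) (pvField_lt p k s)
    · apply List.map_congr_left
      intro i _
      simp [Function.comp]
      congr 2
      omega

-- `v - ((v >> k) << k)` is the low k bits, i.e. the floor mod by 2^k
theorem sub_shift_eq_emod (v : Int) (k : Nat) : v - ((v >>> k) <<< k) = v % 2 ^ k := by
  rw [Int.shiftRight_eq_div_pow, Int.shiftLeft_eq, Int.emod_def]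
  push_cast
  ring

-- B's shift test agrees with the comparison decoder on values in [0, 2^k), k ≥ 1
theorem dec_eq' (k : Nat) (hk : 1 ≤ k) (r : Int) (h0 : 0 ≤ r) (h1 : r < 2 ^ k) :
    (if r >>> (k - 1) ≠ 0 then r - 2 ^ k else r) = pvDec (2 ^ k) (2 ^ (k - 1)) r := by
  unfold pvDec
  rw [Int.shiftRight_eq_div_pow]
  push_cast
  have hs : (0:Int) < 2 ^ (k - 1) := by positivity
  have hk2 : (2:Int) ^ k = 2 ^ (k - 1) * 2 := by
    rw [← pow_succ]; congr 1; omega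
  have hdm : 2 ^ (k - 1) * (r / 2 ^ (k - 1)) + r % 2 ^ (k - 1) = r :=
    Int.mul_ediv_add_emod r (2 ^ (k - 1))
  have hm0 := Int.emod_nonneg r (ne_of_gt hs)
  have hm1 := Int.emod_lt_of_pos r hs
  rw [hk2] at h1
  have hq0 : 0 ≤ r / 2 ^ (k - 1) := Int.ediv_nonneg h0 (le_of_lt hs)
  have hq2 : r / 2 ^ (k - 1) < 2 := by
    rw [Int.ediv_lt_iff_lt_mul hs]; omega
  have hq01 : r / 2 ^ (k - 1) = 0 ∨ r / 2 ^ (k - 1) = 1 := by omega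
  rcases hq01 with h | h <;> rw [h] at hdm ⊢ <;> rw [hk2] <;> simp at hdm ⊢ <;> omega

theorem ubGo_eq (k : Nat) (hk : 1 ≤ k) (v : Int) (n : Nat) :
    ubGo k v n =
      (List.range n).map (fun i => pvDec (2 ^ k) (2 ^ (k - 1)) (pvField v k i)) := by
  induction n using Nat.strong_induction_on generalizing v with
  | _ n ih =>
    rw [ubGo]
    by_cases h0 : n = 0
    · simp [h0]
    by_cases h1 : n = 1
    · subst h1
      simp only [List.range_one, List.map_cons, List.map_nil]
      have hr := sub_shift_eq_emod v k
      have harg : pvField v k 0 = v % 2 ^ k := by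
        simp [pvField, Int.shiftRight_zero]
      simp only [if_neg (by omega : ¬ (1:Nat) = 0)]
      rw [hr, harg]
      exact congrArg (· :: []) (dec_eq' k hk _ (Int.emod_nonneg v (by positivity))
        (Int.emod_lt_of_pos v (by positivity)))
    simp only [if_neg h0, if_neg h1]
    have hh : n / 2 < n := by omega
    have hnh : n - n / 2 < n := by omega
    rw [ih _ hh, ih _ hnh]
    have hsplit : n = n / 2 + (n - n / 2) := by omega
    conv_rhs => rw [hsplit, List.range_add, List.map_append, List.map_map]
    congr 1
    apply List.map_congr_left
    intro i _
    simp only [Function.comp]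
    congr 1
    unfold pvField
    rw [← Int.shiftRight_add]
    congr 2
    ring

-- ===== VERDICT (by name: the statement is the Claim_ definition above) =====
theorem unpack_biases_spec : Claim_equal_unpack_biases := by
  intro p BW OC _ hpre
  unfold Spec_unpack_biases unpack_biases unpack_biases_alt
  have hk : 1 ≤ BW.toNat := by unfold Pre_unpack_biases at hpre; omega
  have hk1 : (BW - 1).toNat = BW.toNat - 1 := by omega
  rw [hk1]
  have h0 : (0 : Nat) = 0 * BW.toNat := by simp
  rw [h0, uaLoop_eq p BW.toNat hk OC.toNat 0, ubGo_eq BW.toNat hk p OC.toNat]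
  simp
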